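-- pv_equiv track=rewrite | github.com/mb0484/magistrska_naloga | support_functions.py | get_all_combinations_2
-- ===== SOURCE A (Python) =====
-- def construct_word(tokens):
--     word = ""
--
--     for token in tokens:
--         if token.startswith("##"):
--             word += token[2:]
--         elif token == '[UNK]':
--             word += ""
--         else:
--             word += token
--
--     return word
--
-- def get_all_combinations_2(array_of_arrays):
--     memo = {}
--
--     def helper(depth, cur_combination):
--         if depth >= len(array_of_arrays):
--             return [construct_word(cur_combination)]
--
--         if depth in memo and tuple(cur_combination) in memo[depth]:
--             return memo[depth][tuple(cur_combination)]
--
--         all_combinations = []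
--         for token in array_of_arrays[depth]:
--             new_array = cur_combination + [token]
--
--             all_combinations += helper(depth + 1, new_array)
--
--         if depth not in memo:
--             memo[depth] = {}
--         memo[depth][tuple(cur_combination)] = all_combinations
--         return all_combinations
--
--     return helper(0, [])
-- ===== SOURCE B (Python) =====
-- def construct_word(tokens):
--     word = ""
--
--     for token in tokens:
--         if token.startswith("##"):
--             word += token[2:]
--         elif token == '[UNK]':
--             word += ""
--         else:
--             word += token
--
--     return word
--
-- def get_all_combinations_2(array_of_arrays):
--     combos = [[]]
--     for arr in array_of_arrays:
--         combos = [c + [t] for c in combos for t in arr]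
--     return [construct_word(c) for c in combos]
-- ===== Notes on version B (the rewrite author's own statement) =====
-- stated objective: simpler
-- what changed: Replaced the recursive helper with per-depth memoization by a plain iterative left-fold building the cartesian product with a comprehension, then mapping construct_word once.
import Mathlib
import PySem

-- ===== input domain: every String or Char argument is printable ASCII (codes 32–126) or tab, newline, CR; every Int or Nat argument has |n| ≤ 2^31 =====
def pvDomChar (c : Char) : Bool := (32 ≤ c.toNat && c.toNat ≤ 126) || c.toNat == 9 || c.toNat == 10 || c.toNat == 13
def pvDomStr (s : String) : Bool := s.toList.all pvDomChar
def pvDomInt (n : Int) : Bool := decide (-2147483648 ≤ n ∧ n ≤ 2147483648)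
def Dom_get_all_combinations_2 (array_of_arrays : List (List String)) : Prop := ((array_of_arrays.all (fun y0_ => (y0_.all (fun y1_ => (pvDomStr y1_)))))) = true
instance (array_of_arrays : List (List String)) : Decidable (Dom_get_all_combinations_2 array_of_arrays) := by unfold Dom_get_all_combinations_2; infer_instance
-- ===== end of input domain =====

-- B replaces A's recursive helper + memo table by an iterative left-fold cartesian
-- product followed by one map of construct_word (objective: simpler; same return value).

-- ===== PORT A =====
-- shared helper (the Python module's construct_word, identical in Source A and Source B)
def construct_word (tokens : List String) : String :=
  tokens.foldl (fun word token =>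
    if PySem.Str.startswith token "##" then word ++ PySem.Str.slice token (some 2) none
    else if token == "[UNK]" then word ++ ""
    else word ++ token) ""

-- the memo dict: depth ↦ (tuple(cur_combination) ↦ all_combinations)
abbrev pvMemo := PySem.Dict Int (PySem.Dict (List String) (List String))

-- A's nested `helper` (the suffix array_of_arrays[depth:] is passed explicitly as
-- `rest`; `depth` is kept as the memo key) together with its `for token in …` loop,
-- threading the mutated memo as state.
mutual
def pvHelperA : List (List String) → Int → List String → pvMemo → (List String × pvMemo)
  | [], _, cur, memo => ([construct_word cur], memo)                   -- depth >= len(array_of_arrays)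
  | a :: rs, depth, cur, memo =>
    match (memo.get? depth).bind (fun inner => inner.get? cur) with   -- depth in memo and tuple(cur) in memo[depth]
    | some v => (v, memo)
    | none =>
      let (all, memo1) := pvLoopA a rs depth cur [] memo
      let memo2 := if memo1.contains depth then memo1
                   else memo1.insert depth PySem.Dict.empty           -- if depth not in memo: memo[depth] = {}
      let memo3 := memo2.modify depth PySem.Dict.empty
                     (fun inner => inner.insert cur all)              -- memo[depth][tuple(cur)] = all_combinations
      (all, memo3)
termination_by rest _ _ _ => (rest.length, 1, 0)

def pvLoopA : List String → List (List String) → Int → List String → List String → pvMemo → (List String × pvMemo)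
  | [], _, _, _, acc, memo => (acc, memo)
  | t :: ts, rs, depth, cur, acc, memo =>
    let (r, memo') := pvHelperA rs (depth + 1) (cur ++ [t]) memo      -- helper(depth + 1, cur_combination + [token])
    pvLoopA ts rs depth cur (acc ++ r) memo'
termination_by ts rs _ _ _ _ => (rs.length + 1, 0, ts.length)
end

def get_all_combinations_2 (array_of_arrays : List (List String)) : List String :=
  (pvHelperA array_of_arrays 0 [] PySem.Dict.empty).1

-- ===== PORT B =====
def get_all_combinations_2_alt (array_of_arrays : List (List String)) : List String :=
  (array_of_arrays.foldl
      (fun combos arr => combos.flatMap (fun c => arr.map (fun t => c ++ [t])))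
      [[]]).map (fun c => construct_word c)

-- ===== PRECONDITION & SPEC =====
def Spec_get_all_combinations_2 (array_of_arrays : List (List String)) (out : List String) : Prop := out = get_all_combinations_2_alt array_of_arrays
instance (array_of_arrays : List (List String)) (out : List String) : Decidable (Spec_get_all_combinations_2 array_of_arrays out) := by unfold Spec_get_all_combinations_2; infer_instance

-- ===== CLAIM (what is proved, stated in full; the proofs are below) =====
def Claim_equal_get_all_combinations_2 : Prop := ∀ (array_of_arrays : List (List String)), Dom_get_all_combinations_2 array_of_arrays → Spec_get_all_combinations_2 array_of_arrays (get_all_combinations_2 array_of_arrays)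

-- ===== LEMMAS AND PROOFS =====

-- the pure value A's helper computes, ignoring the memo
def pvPure : List (List String) → List String → List String
  | [], cur => [construct_word cur]
  | a :: rs, cur => a.flatMap (fun t => pvPure rs (cur ++ [t]))

-- lookup of (depth, combination) in the memo, as one total function
def pvLookup (m : pvMemo) (d : Int) (c : List String) : Option (List String) :=
  (m.getD d PySem.Dict.empty).get? c

theorem pvLookup_eq_bind (m : pvMemo) (d : Int) (c : List String) :
    ((m.get? d).bind (fun inner => inner.get? c)) = pvLookup m d c := by
  unfold pvLookup
  rw [PySem.Dict.getD_eq_get?_getD]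
  cases h : m.get? d with
  | none => simp [PySem.Dict.get?_empty]
  | some inner => simp

-- effect of A's two-step memo update on every lookup
theorem pvLookup_update (m : pvMemo) (depth : Int) (cur all : List String)
    (d : Int) (c : List String) :
    pvLookup ((if m.contains depth then m else m.insert depth PySem.Dict.empty).modify
        depth PySem.Dict.empty (fun inner => inner.insert cur all)) d c
      = if d = depth ∧ c = cur then some all else pvLookup m d c := by
  have hm2 : (if m.contains depth then m else m.insert depth PySem.Dict.empty).getD depth
      PySem.Dict.empty = m.getD depth PySem.Dict.empty := by
    by_cases h : m.contains depth = true
    · simp [h]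
    · have hnone : m.get? depth = none := by
        have := PySem.Dict.contains_eq_isSome_get? m depth
        cases hq : m.get? depth with
        | none => rfl
        | some _ => rw [hq] at this; simp [this] at h
      rw [if_neg h, PySem.Dict.getD_insert_self, PySem.Dict.getD_eq_get?_getD, hnone]
      rfl
  by_cases hd : d = depth
  · subst hd
    unfold pvLookup
    rw [PySem.Dict.getD_modify_self, hm2]
    by_cases hc : c = cur
    · subst hc
      simp [PySem.Dict.get?_insert_self]
    · rw [PySem.Dict.get?_insert_of_ne _ _ hc]
      simp [hc]
  · unfold pvLookup
    rw [PySem.Dict.getD_modify_of_ne _ _ _ hd]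
    have : (if m.contains depth then m else m.insert depth PySem.Dict.empty).getD d
        PySem.Dict.empty = m.getD d PySem.Dict.empty := by
      by_cases h : m.contains depth = true
      · simp [h]
      · rw [if_neg h, PySem.Dict.getD_insert_of_ne _ _ _ hd]
    rw [this]
    simp [hd]

-- memo invariant: every stored entry is the pure value of the suffix at its depth
def pvInv (full : List (List String)) (memo : pvMemo) : Prop :=
  ∀ (d : Int) (c v : List String),
    pvLookup memo d c = some v →
    ∃ n : Nat, d = (n : Int) ∧ v = pvPure (full.drop n) c

theorem pvInv_empty (full : List (List String)) : pvInv full PySem.Dict.empty := by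
  intro d c v h
  unfold pvLookup at h
  rw [PySem.Dict.getD_eq_get?_getD, PySem.Dict.get?_empty] at h
  simp [PySem.Dict.get?_empty] at h

theorem pvHelperA_correct (full : List (List String)) :
    ∀ (rest : List (List String)) (n : Nat) (cur : List String) (memo : pvMemo),
      rest = full.drop n → pvInv full memo →
      (pvHelperA rest (n : Int) cur memo).1 = pvPure rest cur ∧
        pvInv full (pvHelperA rest (n : Int) cur memo).2 := by
  intro rest
  induction rest with
  | nil =>
    intro n cur memo _ hinv
    simp only [pvHelperA, pvPure]
    exact ⟨trivial, hinv⟩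
  | cons a rs ih =>
    intro n cur memo hrest hinv
    have hrs : rs = full.drop (n + 1) := by
      have := congrArg List.tail hrest
      simpa [List.tail_drop] using this
    -- the token loop
    have loop :
        ∀ (ts : List String) (acc : List String) (m : pvMemo), pvInv full m →
          (pvLoopA ts rs (n : Int) cur acc m).1
              = acc ++ ts.flatMap (fun t => pvPure rs (cur ++ [t])) ∧
            pvInv full (pvLoopA ts rs (n : Int) cur acc m).2 := by
      intro ts
      induction ts with
      | nil => intro acc m hm; simp only [pvLoopA]; simpa using hm
      | cons t ts' ihts =>
        intro acc m hm
        have hcast : ((n : Int) + 1) = ((n + 1 : Nat) : Int) := by push_cast; ring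
        have hrec : (pvHelperA rs ((n : Int) + 1) (cur ++ [t]) m).1 = pvPure rs (cur ++ [t]) ∧
            pvInv full (pvHelperA rs ((n : Int) + 1) (cur ++ [t]) m).2 := by
          rw [hcast]; exact ih (n + 1) (cur ++ [t]) m hrs hm
        obtain ⟨h1, h2⟩ := ihts (acc ++ (pvHelperA rs ((n : Int) + 1) (cur ++ [t]) m).1)
          (pvHelperA rs ((n : Int) + 1) (cur ++ [t]) m).2 hrec.2
        constructor
        · rw [pvLoopA, h1, hrec.1]
          simp only [List.flatMap_cons, List.append_assoc]
        · rw [pvLoopA]; exact h2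
    -- unfold pvHelperA on the cons case
    rw [pvHelperA, pvLookup_eq_bind]
    cases hlk : pvLookup memo (n : Int) cur with
    | some v =>
      obtain ⟨m', hm', hv⟩ := hinv _ _ _ hlk
      have hmn : (m' : Int) = (n : Int) := hm'.symm
      have hmn' : m' = n := by exact_mod_cast hmn
      subst hmn'
      refine ⟨?_, hinv⟩
      simp only [hv, ← hrest]
    | none =>
      obtain ⟨h1, h2⟩ := loop a [] memo hinv
      simp only
      constructor
      · rw [h1]; simp [pvPure]
      · -- the updated memo still satisfies the invariant
        intro d c v hget
        rw [pvLookup_update] at hget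
        by_cases hdc : d = (n : Int) ∧ c = cur
        · rw [if_pos hdc] at hget
          refine ⟨n, hdc.1, ?_⟩
          have hv : v = a.flatMap (fun t => pvPure rs (cur ++ [t])) := by
            have := h1
            simp only [List.nil_append] at this
            rw [← this]
            exact (Option.some.inj hget).symm
          rw [hv, hdc.2, ← hrest]
          rfl
        · rw [if_neg hdc] at hget
          exact h2 _ _ _ hget

theorem pvFoldl_acc (rest : List (List String)) :
    ∀ (acc : List (List String)),
      rest.foldl (fun combos arr => combos.flatMap (fun c => arr.map (fun t => c ++ [t]))) acc
        = acc.flatMap (fun c0 =>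
            (rest.foldl (fun combos arr => combos.flatMap (fun c => arr.map (fun t => c ++ [t]))) [[]]).map
              (fun c => c0 ++ c)) := by
  induction rest with
  | nil => intro acc; simp
  | cons a rs ihr =>
    intro acc
    simp only [List.foldl_cons]
    rw [ihr (acc.flatMap fun c => a.map fun t => c ++ [t]),
        ihr ([[]].flatMap fun c => a.map fun t => c ++ [t])]
    simp [List.flatMap_assoc, List.flatMap_map, List.map_flatMap, Function.comp_def, List.map_map, List.append_assoc]

theorem pvPure_eq_product (rest : List (List String)) :
    ∀ (cur : List String), pvPure rest cur
      = (rest.foldl (fun combos arr => combos.flatMap (fun c => arr.map (fun t => c ++ [t]))) [[]]).map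
          (fun c => construct_word (cur ++ c)) := by
  induction rest with
  | nil => intro cur; simp [pvPure]
  | cons a rs ihr =>
    intro cur
    simp only [pvPure, List.foldl_cons]
    rw [pvFoldl_acc]
    simp only [List.flatMap_singleton, List.nil_append, List.flatMap_map, List.map_flatMap,
      Function.comp_def, List.map_map]
    refine List.flatMap_congr ?_
    intro t _
    rw [ihr]
    simp [List.append_assoc]

-- ===== VERDICT (by name: the statement is the Claim_ definition above) =====
theorem get_all_combinations_2_spec : Claim_equal_get_all_combinations_2 := by
  intro arrays _
  unfold Spec_get_all_combinations_2 get_all_combinations_2 get_all_combinations_2_alt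
  have h := (pvHelperA_correct arrays arrays 0 [] PySem.Dict.empty (by simp) (pvInv_empty arrays)).1
  simp only [Nat.cast_zero] at h
  rw [h, pvPure_eq_product arrays []]
  simp
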